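-- pv_equiv track=rewrite | github.com/qianjun-ql/algorithm | 541/LLSLength.py | lssLength
-- ===== SOURCE A (Python) =====
-- def lssLength(a, i, j):
--     aj = a[j] if 0 <= j < len(a) else None
--     # Implement the recurrence below. Use recursive calls back to lssLength
--     # your code here
--     if i == len(a):
--         return 0
--
--     if aj is not None and abs(a[i] - aj) > 1:
--         return lssLength(a, i+1, j)  # Skip current element
--
--     return max(
--         lssLength(a, i+1, j),
--         1 + lssLength(a, i+1, i)
--     )
-- ===== SOURCE B (Python) =====
-- def lssLength(a, i, j):
--     # Bottom-up DP over (position, previous-index) instead of A's exponential recursion.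
--     # row[t+1] holds the best suffix length from the current position when the last
--     # taken element is a[t] (t = -1 means "none taken yet").
--     n = len(a)
--     jj = j if 0 <= j < n else -1
--     row = [0] * (n + 1)
--     for k in range(n - 1, i - 1, -1):
--         row = [row[t + 1] if t >= 0 and abs(a[k] - a[t]) > 1
--                else max(row[t + 1], 1 + row[k + 1])
--                for t in range(-1, n)]
--     return row[jj + 1]
-- ===== Notes on version B (the rewrite author's own statement) =====
-- stated objective: faster
-- what changed: A's exponential branching recursion over (position, previous-index) is replaced by a bottom-up dynamic program that sweeps one row of n+1 best-length values per position, back to front.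
-- outside the precondition, e.g. on lssLength([5], -2, 9): A returns 3, B raises IndexError
import Mathlib
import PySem

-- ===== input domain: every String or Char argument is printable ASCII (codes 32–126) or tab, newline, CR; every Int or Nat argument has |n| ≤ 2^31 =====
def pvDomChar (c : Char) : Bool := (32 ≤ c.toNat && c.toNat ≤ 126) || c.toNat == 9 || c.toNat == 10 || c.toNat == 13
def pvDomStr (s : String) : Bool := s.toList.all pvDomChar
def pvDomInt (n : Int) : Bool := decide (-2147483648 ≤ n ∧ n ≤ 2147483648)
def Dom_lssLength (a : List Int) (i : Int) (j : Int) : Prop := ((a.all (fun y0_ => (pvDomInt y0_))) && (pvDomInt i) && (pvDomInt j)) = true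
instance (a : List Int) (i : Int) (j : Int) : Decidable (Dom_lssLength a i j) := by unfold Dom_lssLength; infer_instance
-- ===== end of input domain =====

-- B replaces A's exponential branching recursion by a bottom-up DP over (position, previous-index) rows.

-- ===== PORT A =====
-- Literal port of A's recursion.  The outer dite guard `a.length < i` only makes the
-- recursion total: there Python never returns (IndexError / RecursionError, outside Pre_).
def lssLength (a : List Int) (i : Int) (j : Int) : Int :=
  if _h : (a.length : Int) < i then 0  -- Python never returns here (outside Pre_); termination guard
  else
    -- aj = a[j] if 0 <= j < len(a) else None
    let aj : Option Int := if 0 ≤ j ∧ j < (a.length : Int) then PySem.List.pyGet? a j else none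
    if _h2 : i = (a.length : Int) then 0
    else
      match aj with
      | some x =>
        match PySem.List.pyGet? a i with
        | none => 0  -- a[i] raises IndexError in Python (outside Pre_)
        | some ai =>
          if 1 < |ai - x| then lssLength a (i + 1) j
          else max (lssLength a (i + 1) j) (1 + lssLength a (i + 1) i)
      | none => max (lssLength a (i + 1) j) (1 + lssLength a (i + 1) i)
termination_by ((a.length : Int) + 1 - i).toNat
decreasing_by all_goals omega

-- ===== PORT B =====
-- Literal port of Source B.  List indexing is pyGetD with default 0: inside Pre_ every
-- index Source B uses is in range, so the default is never read and pyGetD is exact.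
def lssLength_alt (a : List Int) (i : Int) (j : Int) : Int :=
  let n : Int := a.length
  let jj : Int := if 0 ≤ j ∧ j < n then j else -1
  let row0 : List Int := List.replicate (a.length + 1) 0
  let row :=
    (PySem.List.pyRange (n - 1) (i - 1) (-1)).foldl
      (fun row k =>
        (PySem.List.pyRange (-1) n 1).map (fun t =>
          if 0 ≤ t ∧ 1 < |PySem.List.pyGetD a k 0 - PySem.List.pyGetD a t 0| then
            PySem.List.pyGetD row (t + 1) 0
          else
            max (PySem.List.pyGetD row (t + 1) 0) (1 + PySem.List.pyGetD row (k + 1) 0)))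
      row0
  PySem.List.pyGetD row (jj + 1) 0

-- ===== PRECONDITION & SPEC =====
-- Pre_ excludes i > len(a), where A raises (IndexError, or RecursionError when aj
-- is None), and i < -len(a), where A raises IndexError when a[j] is in range but,
-- when aj is None, short-circuits past the a[i] read and returns a value while B's
-- own indexing raises IndexError there.
def Pre_lssLength (a : List Int) (i : Int) (j : Int) : Prop :=
  -(a.length : Int) ≤ i ∧ i ≤ (a.length : Int)
instance (a : List Int) (i : Int) (j : Int) : Decidable (Pre_lssLength a i j) := by
  unfold Pre_lssLength; infer_instance

def pvWitness_lssLength : List Int × Int × Int := ([0, 1, 3, 2], 0, 5)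

def Spec_lssLength (a : List Int) (i : Int) (j : Int) (out : Int) : Prop := out = lssLength_alt a i j
instance (a : List Int) (i : Int) (j : Int) (out : Int) : Decidable (Spec_lssLength a i j out) := by
  unfold Spec_lssLength; infer_instance

-- ===== CLAIM (what is proved, stated in full; the proofs are below) =====
def Claim_equal_lssLength : Prop := ∀ (a : List Int) (i : Int) (j : Int), Dom_lssLength a i j → Pre_lssLength a i j → Spec_lssLength a i j (lssLength a i j)
-- ===== LEMMAS AND PROOFS =====

-- The recurrence both programs compute: best length of a subsequence of the remaining
-- suffix, where the next chosen element must differ by ≤ 1 from the optional previous value.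
def pvF : List Int → Option Int → Int
  | [], _ => 0
  | x :: rest, v =>
    match v with
    | some p => if 1 < |x - p| then pvF rest (some p)
                else max (pvF rest (some p)) (1 + pvF rest (some x))
    | none => max (pvF rest none) (1 + pvF rest (some x))

-- A's `aj = a[j] if 0 <= j < len(a) else None`.
def pvAj (a : List Int) (j : Int) : Option Int :=
  if 0 ≤ j ∧ j < (a.length : Int) then PySem.List.pyGet? a j else none

-- A computes pvF on the suffix from i, with previous value aj.
lemma pvA_eq_F (a : List Int) : ∀ (i j : Int), 0 ≤ i → i ≤ (a.length : Int) →
    lssLength a i j = pvF (a.drop i.toNat) (pvAj a j) := by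
  suffices H : ∀ (d : Nat) (i j : Int), 0 ≤ i → i ≤ (a.length : Int) →
      ((a.length : Int) - i).toNat = d → lssLength a i j = pvF (a.drop i.toNat) (pvAj a j) by
    intro i j h0 h1
    exact H _ i j h0 h1 rfl
  intro d
  induction d with
  | zero =>
    intro i j h0 h1 hd
    have hi : i = (a.length : Int) := by omega
    rw [lssLength]
    simp only [hi]
    have : a.length ≤ ((a.length : Int)).toNat := by omega
    rw [List.drop_of_length_le this]
    simp [pvF]
  | succ d ih =>
    intro i j h0 h1 hd
    have hilt : i < (a.length : Int) := by omega
    have hlen : i.toNat < a.length := by omega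
    have hdrop : a.drop i.toNat = a[i.toNat] :: a.drop (i.toNat + 1) :=
      List.drop_eq_getElem_cons hlen
    have hsucc : (i + 1).toNat = i.toNat + 1 := by omega
    have hget : PySem.List.pyGet? a i = some a[i.toNat] :=
      PySem.List.pyGet?_eq_some_getElem a h0 hilt
    have haji : pvAj a i = some a[i.toNat] := by
      unfold pvAj
      rw [if_pos ⟨h0, hilt⟩, hget]
    rw [lssLength]
    rw [dif_neg (by omega), dif_neg (by omega)]
    rw [show (if 0 ≤ j ∧ j < ((a.length : Int)) then PySem.List.pyGet? a j else none) = pvAj a j from rfl]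
    rw [hdrop]
    cases hv : pvAj a j with
    | none =>
      simp only [pvF]
      rw [ih (i+1) j (by omega) (by omega) (by omega), ih (i+1) i (by omega) (by omega) (by omega),
          hsucc, hv, haji]
    | some x =>
      rw [hget]
      simp only [pvF]
      split_ifs with hc
      · rw [ih (i+1) j (by omega) (by omega) (by omega), hsucc, hv]
      · rw [ih (i+1) j (by omega) (by omega) (by omega), ih (i+1) i (by omega) (by omega) (by omega),
            hsucc, hv, haji]

-- The row Source B's loop maintains once positions k..n-1 are processed:
-- slot t+1 holds pvF (suffix from k) with previous element a[t] (t = -1: none).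
def pvRowF (a : List Int) (k : Int) : List Int :=
  (PySem.List.pyRange (-1) (a.length : Int) 1).map
    (fun t => pvF (a.drop k.toNat) (if 0 ≤ t then some (a.getD t.toNat 0) else none))

lemma pvRowF_get (a : List Int) (k t : Int) (ht : -1 ≤ t) (ht2 : t < (a.length : Int)) :
    PySem.List.pyGetD (pvRowF a k) (t + 1) 0
      = pvF (a.drop k.toNat) (if 0 ≤ t then some (a.getD t.toNat 0) else none) := by
  have hlen : (pvRowF a k).length = a.length + 1 := by
    unfold pvRowF
    rw [List.length_map, PySem.List.length_pyRange_one]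
    omega
  rw [PySem.List.pyGetD_eq_getElem (pvRowF a k) 0 (by omega) (by omega)]
  unfold pvRowF
  rw [List.getElem_map]
  rw [PySem.List.getElem_pyRange_one]
  have : -1 + ((t + 1).toNat : Int) = t := by omega
  rw [this]

-- One iteration of Source B's outer loop turns row k+1 into row k.
lemma pvRow_step (a : List Int) (k : Int) (hk0 : 0 ≤ k) (hk1 : k < (a.length : Int)) :
    (PySem.List.pyRange (-1) (a.length : Int) 1).map (fun t =>
      if 0 ≤ t ∧ 1 < |PySem.List.pyGetD a k 0 - PySem.List.pyGetD a t 0| then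
        PySem.List.pyGetD (pvRowF a (k + 1)) (t + 1) 0
      else
        max (PySem.List.pyGetD (pvRowF a (k + 1)) (t + 1) 0)
            (1 + PySem.List.pyGetD (pvRowF a (k + 1)) (k + 1) 0))
      = pvRowF a k := by
  have hklen : k.toNat < a.length := by omega
  have hdrop : a.drop k.toNat = a[k.toNat] :: a.drop (k.toNat + 1) :=
    List.drop_eq_getElem_cons hklen
  have hsucc : (k + 1).toNat = k.toNat + 1 := by omega
  have hak : PySem.List.pyGetD a k 0 = a[k.toNat] := PySem.List.pyGetD_eq_getElem a 0 hk0 hk1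
  have hrowk : PySem.List.pyGetD (pvRowF a (k + 1)) (k + 1) 0
      = pvF (a.drop (k.toNat + 1)) (some a[k.toNat]) := by
    rw [pvRowF_get a (k+1) k (by omega) hk1, if_pos hk0, hsucc, List.getD_eq_getElem a 0 hklen]
  conv_rhs => rw [pvRowF]
  apply List.map_congr_left
  intro t htmem
  have hmem := PySem.List.mem_pyRange_one.mp htmem
  rw [pvRowF_get a (k+1) t hmem.1 hmem.2, hrowk, hsucc, hdrop]
  by_cases h0t : 0 ≤ t
  · have hat : PySem.List.pyGetD a t 0 = a[t.toNat] := PySem.List.pyGetD_eq_getElem a 0 h0t hmem.2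
    have hgt : a.getD t.toNat 0 = a[t.toNat] := List.getD_eq_getElem a 0 (by omega)
    simp only [if_pos h0t, hat, hgt, hak, pvF]
    by_cases hc : 1 < |a[k.toNat] - a[t.toNat]|
    · rw [if_pos ⟨h0t, hc⟩, if_pos hc]
    · rw [if_neg (by tauto), if_neg hc]
  · simp only [if_neg h0t, pvF]
    rw [if_neg (by tauto)]

-- Folding Source B's loop from row m down to row i.
lemma pvB_fold (a : List Int) (i : Int) (h0 : 0 ≤ i) : ∀ (d : Nat) (m : Int), i ≤ m → m ≤ (a.length : Int) →
    (m - i).toNat = d →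
    (PySem.List.pyRange (m - 1) (i - 1) (-1)).foldl
      (fun row k =>
        (PySem.List.pyRange (-1) (a.length : Int) 1).map (fun t =>
          if 0 ≤ t ∧ 1 < |PySem.List.pyGetD a k 0 - PySem.List.pyGetD a t 0| then
            PySem.List.pyGetD row (t + 1) 0
          else
            max (PySem.List.pyGetD row (t + 1) 0) (1 + PySem.List.pyGetD row (k + 1) 0)))
      (pvRowF a m) = pvRowF a i := by
  intro d
  induction d with
  | zero =>
    intro m hm1 hm2 hd
    have : m = i := by omega
    subst this
    rw [PySem.List.pyRange_neg_one_eq_nil (by omega)]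
    rfl
  | succ d ih =>
    intro m hm1 hm2 hd
    have hlt : i < m := by omega
    rw [PySem.List.pyRange_neg_one_cons (by omega : i - 1 < m - 1)]
    rw [List.foldl_cons]
    simp only [show m - 1 + 1 = m from by ring]
    have hstep := pvRow_step a (m - 1) (by omega) (by omega)
    simp only [show m - 1 + 1 = m from by ring] at hstep
    rw [hstep]
    exact ih (m - 1) (by omega) (by omega) (by omega)

-- Source B's initial row [0]*(n+1) is the row for position n.
lemma pvRowF_top (a : List Int) : pvRowF a (a.length : Int) = List.replicate (a.length + 1) 0 := by
  unfold pvRowF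
  have hdrop : a.drop ((a.length : Int)).toNat = [] := List.drop_of_length_le (by omega)
  rw [hdrop]
  have : ∀ v : Option Int, pvF [] v = 0 := fun v => by cases v <;> rfl
  rw [List.map_congr_left (fun t _ => this _)]
  rw [List.map_const', PySem.List.length_pyRange_one]
  norm_num

-- B computes the same pvF value.
lemma pvB_eq_F (a : List Int) (i j : Int) (h0 : 0 ≤ i) (h1 : i ≤ (a.length : Int)) :
    lssLength_alt a i j = pvF (a.drop i.toNat) (pvAj a j) := by
  unfold lssLength_alt
  simp only []
  rw [← pvRowF_top a]
  rw [pvB_fold a i h0 _ (a.length : Int) h1 le_rfl rfl]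
  by_cases hj : 0 ≤ j ∧ j < (a.length : Int)
  · rw [if_pos hj, pvRowF_get a i j (by omega) hj.2, if_pos hj.1]
    unfold pvAj
    rw [if_pos hj, PySem.List.pyGet?_eq_some_getElem a hj.1 hj.2,
        List.getD_eq_getElem a 0 (by omega)]
  · rw [if_neg hj, pvRowF_get a i (-1) (by omega) (by omega), if_neg (by omega)]
    unfold pvAj
    rw [if_neg hj]


def pvH (a : List Int) : Nat → Option Int → Int
  | 0, v => pvF a v
  | m + 1, v =>
    match v with
    | some p => if 1 < |a.getD (a.length - (m + 1)) 0 - p| then pvH a m (some p)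
                else max (pvH a m (some p)) (1 + pvH a m none)
    | none => max (pvH a m none) (1 + pvH a m none)

lemma pvF_le_none (l : List Int) : ∀ p : Int, pvF l (some p) ≤ pvF l none := by
  induction l with
  | nil => intro p; simp [pvF]
  | cons x r ih =>
    intro p
    simp only [pvF]
    by_cases hb : 1 < |x - p|
    · rw [if_pos hb]
      exact le_trans (ih p) (le_max_left _ _)
    · rw [if_neg hb]
      exact max_le_max (ih p) le_rfl

lemma pvH_le_none (a : List Int) : ∀ (m : Nat) (p : Int), pvH a m (some p) ≤ pvH a m none := by
  intro m
  induction m with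
  | zero => intro p; exact pvF_le_none a p
  | succ m ih =>
    intro p
    simp only [pvH]
    by_cases hb : 1 < |a.getD (a.length - (m + 1)) 0 - p|
    · rw [if_pos hb]
      exact le_trans (ih p) (le_max_left _ _)
    · rw [if_neg hb]
      exact max_le_max (ih p) le_rfl

lemma pvH_none_succ (a : List Int) (m : Nat) : pvH a (m + 1) none = 1 + pvH a m none := by
  simp only [pvH]
  exact max_eq_right (by linarith)

lemma pvH_head (a : List Int) (m : Nat) (h1 : 1 ≤ m) :
    pvH a m (some (a.getD (a.length - m) 0)) = pvH a m none := by
  obtain ⟨mm, rfl⟩ : ∃ mm, m = mm + 1 := ⟨m - 1, by omega⟩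
  rw [pvH_none_succ]
  simp only [pvH, sub_self, abs_zero]
  rw [if_neg (by norm_num)]
  exact max_eq_right (le_trans (pvH_le_none a mm _) (by linarith))

-- A on a negative start index -m computes pvH a m.
lemma pvA_eq_H (a : List Int) : ∀ (m : Nat), m ≤ a.length → ∀ (j : Int),
    lssLength a (-(m : Int)) j = pvH a m (pvAj a j) := by
  intro m
  induction m with
  | zero =>
    intro _ j
    have h := pvA_eq_F a 0 j le_rfl (by omega)
    simpa [pvH, List.drop_zero] using h
  | succ m ih =>
    intro hm j
    have hidx : a.length - (m + 1) < a.length := by omega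
    have hget : PySem.List.pyGet? a (-((m : Int) + 1)) = some a[a.length - (m + 1)] := by
      have := PySem.List.pyGet?_neg_natCast (xs := a) (k := m + 1) (by omega) (by omega)
      rw [List.getElem?_eq_getElem hidx] at this
      simpa using this
    have hajneg : pvAj a (-((m : Int) + 1)) = none := by
      unfold pvAj
      rw [if_neg (by omega)]
    rw [show (-(((m : Nat) + 1 : Nat) : Int)) = -((m : Int) + 1) from by norm_num]
    rw [lssLength]
    rw [dif_neg (by omega), dif_neg (by omega)]
    rw [show (if 0 ≤ j ∧ j < ((a.length : Int)) then PySem.List.pyGet? a j else none) = pvAj a j from rfl]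
    cases hv : pvAj a j with
    | none =>
      simp only [pvH]
      rw [show -((m : Int) + 1) + 1 = -(m : Int) from by ring]
      rw [ih (by omega) j, ih (by omega) (-((m : Int) + 1)), hv, hajneg]
    | some x =>
      rw [hget]
      simp only [pvH]
      rw [List.getD_eq_getElem a 0 hidx]
      rw [show -((m : Int) + 1) + 1 = -(m : Int) from by ring]
      split_ifs with hc
      · rw [ih (by omega) j, hv]
      · rw [ih (by omega) j, ih (by omega) (-((m : Int) + 1)), hv, hajneg]

-- Reading slot t+1 of a row laid out over pyRange (-1) n 1.
lemma pvMapRow_get (a : List Int) (g : Int → Int) (t : Int) (ht : -1 ≤ t)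
    (ht2 : t < (a.length : Int)) :
    PySem.List.pyGetD ((PySem.List.pyRange (-1) (a.length : Int) 1).map g) (t + 1) 0 = g t := by
  have hlen : ((PySem.List.pyRange (-1) (a.length : Int) 1).map g).length = a.length + 1 := by
    rw [List.length_map, PySem.List.length_pyRange_one]; omega
  rw [PySem.List.pyGetD_eq_getElem _ 0 (by omega) (by omega)]
  rw [List.getElem_map, PySem.List.getElem_pyRange_one]
  congr 1
  omega

-- Python wraps a negative row index -m to slot n+1-m, i.e. state index t = n-m.
lemma pvMapRow_get_neg (a : List Int) (g : Int → Int) (m : Nat) (h1 : 1 ≤ m)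
    (h2 : m ≤ a.length) :
    PySem.List.pyGetD ((PySem.List.pyRange (-1) (a.length : Int) 1).map g) (-(m : Int)) 0
      = g ((a.length : Int) - m) := by
  have hlen : ((PySem.List.pyRange (-1) (a.length : Int) 1).map g).length = a.length + 1 := by
    rw [List.length_map, PySem.List.length_pyRange_one]; omega
  have := PySem.List.pyGetD_neg_natCast
    (xs := (PySem.List.pyRange (-1) (a.length : Int) 1).map g) (k := m) 0 (by omega) (by omega)
  rw [this]
  rw [List.getElem_map, PySem.List.getElem_pyRange_one]
  congr 1
  rw [hlen]
  omega

def pvRowH (a : List Int) (m : Nat) : List Int :=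
  (PySem.List.pyRange (-1) (a.length : Int) 1).map
    (fun t => pvH a m (if 0 ≤ t then some (a.getD t.toNat 0) else none))

lemma pvRowH_zero (a : List Int) : pvRowH a 0 = pvRowF a 0 := by
  unfold pvRowH pvRowF
  simp [pvH]

-- One iteration of Source B's loop at a negative k = -(m'+1) turns pvRowH m' into pvRowH (m'+1).
lemma pvRow_step_neg (a : List Int) (m' : Nat) (hm : m' + 1 ≤ a.length) :
    (PySem.List.pyRange (-1) (a.length : Int) 1).map (fun t =>
      if 0 ≤ t ∧ 1 < |PySem.List.pyGetD a (-((m' : Int) + 1)) 0 - PySem.List.pyGetD a t 0| then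
        PySem.List.pyGetD (pvRowH a m') (t + 1) 0
      else
        max (PySem.List.pyGetD (pvRowH a m') (t + 1) 0)
            (1 + PySem.List.pyGetD (pvRowH a m') (-((m' : Int) + 1) + 1) 0))
      = pvRowH a (m' + 1) := by
  have hidx : a.length - (m' + 1) < a.length := by omega
  have hak : PySem.List.pyGetD a (-((m' : Int) + 1)) 0 = a[a.length - (m' + 1)] := by
    have h := PySem.List.pyGetD_neg_natCast (xs := a) (k := m' + 1) 0 (by omega) (by omega)
    rw [show -((m' : Int) + 1) = -(((m' + 1 : Nat)) : Int) from by norm_num, h]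
  -- the 1 + row[k+1] read: Python's wraparound lands on pvH a m' none either way
  have htake : PySem.List.pyGetD (pvRowH a m') (-((m' : Int) + 1) + 1) 0 = pvH a m' none := by
    rcases Nat.eq_zero_or_pos m' with h0 | h0
    · subst h0
      rw [show -(((0 : Nat) : Int) + 1) + 1 = -1 + 1 from by norm_num]
      have := pvMapRow_get a
        (fun t => pvH a 0 (if 0 ≤ t then some (a.getD t.toNat 0) else none)) (-1)
        le_rfl (by omega)
      simpa [pvRowH] using this
    · have hcast : -((m' : Int) + 1) + 1 = -((m' : Nat) : Int) := by ring
      rw [hcast]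
      unfold pvRowH
      rw [pvMapRow_get_neg a _ m' h0 (by omega)]
      rw [if_pos (by omega)]
      have hnat : ((a.length : Int) - (m' : Int)).toNat = a.length - m' := by omega
      rw [hnat]
      exact pvH_head a m' h0
  conv_rhs => rw [pvRowH]
  apply List.map_congr_left
  intro t htmem
  have hmem := PySem.List.mem_pyRange_one.mp htmem
  have hslot : PySem.List.pyGetD (pvRowH a m') (t + 1) 0
      = pvH a m' (if 0 ≤ t then some (a.getD t.toNat 0) else none) := by
    unfold pvRowH
    exact pvMapRow_get a _ t hmem.1 hmem.2
  rw [hslot, htake, hak]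
  by_cases h0t : 0 ≤ t
  · have hat : PySem.List.pyGetD a t 0 = a[t.toNat] := PySem.List.pyGetD_eq_getElem a 0 h0t hmem.2
    have hgt : a.getD t.toNat 0 = a[t.toNat] := List.getD_eq_getElem a 0 (by omega)
    simp only [if_pos h0t, hat, hgt, pvH]
    rw [List.getD_eq_getElem a 0 hidx]
    by_cases hc : 1 < |a[a.length - (m' + 1)] - a[t.toNat]|
    · rw [if_pos ⟨h0t, hc⟩, if_pos hc]
    · rw [if_neg (by tauto), if_neg hc]
  · simp only [if_neg h0t, pvH]
    rw [if_neg (by tauto)]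

-- Folding Source B's loop over the negative indices -(m'+1) .. -M.
lemma pvB_fold_neg (a : List Int) (M : Nat) (hM : M ≤ a.length) : ∀ (d m' : Nat), m' + d = M →
    (PySem.List.pyRange (-(m' : Int) - 1) (-(M : Int) - 1) (-1)).foldl
      (fun row k =>
        (PySem.List.pyRange (-1) (a.length : Int) 1).map (fun t =>
          if 0 ≤ t ∧ 1 < |PySem.List.pyGetD a k 0 - PySem.List.pyGetD a t 0| then
            PySem.List.pyGetD row (t + 1) 0
          else
            max (PySem.List.pyGetD row (t + 1) 0) (1 + PySem.List.pyGetD row (k + 1) 0)))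
      (pvRowH a m') = pvRowH a M := by
  intro d
  induction d with
  | zero =>
    intro m' hd
    have : m' = M := by omega
    subst this
    rw [PySem.List.pyRange_neg_one_eq_nil (by omega)]
    rfl
  | succ d ih =>
    intro m' hd
    have hlt : m' < M := by omega
    rw [PySem.List.pyRange_neg_one_cons (by omega : -(M : Int) - 1 < -(m' : Int) - 1)]
    rw [List.foldl_cons]
    rw [show -(m' : Int) - 1 = -((m' : Int) + 1) from by ring]
    rw [pvRow_step_neg a m' (by omega)]
    have := ih (m' + 1) (by omega)
    rw [show -((m' + 1 : Nat) : Int) - 1 = -((m' : Int) + 1) - 1 from by norm_num] at this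
    exact this

-- Source B's countdown range for a negative start splits at -1: first the suffix rows, then the wrapped steps.
lemma pvRange_split (a : List Int) (i : Int) (hi : i ≤ 0) :
    PySem.List.pyRange ((a.length : Int) - 1) (i - 1) (-1)
      = PySem.List.pyRange ((a.length : Int) - 1) (-1) (-1)
        ++ PySem.List.pyRange (-1) (i - 1) (-1) := by
  rw [PySem.List.pyRange_neg_one_eq_reverse, PySem.List.pyRange_neg_one_eq_reverse,
      PySem.List.pyRange_neg_one_eq_reverse]
  rw [show i - 1 + 1 = i from by ring, show (a.length : Int) - 1 + 1 = (a.length : Int) from by ring,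
      show (-1 : Int) + 1 = 0 from by ring]
  rw [← List.reverse_append]
  rw [← PySem.List.pyRange_one_append i 0 (a.length : Int) hi (by omega)]

lemma pvB_eq_H (a : List Int) (i j : Int) (h0 : i < 0) (h1 : -(a.length : Int) ≤ i) :
    lssLength_alt a i j = pvH a (-i).toNat (pvAj a j) := by
  have hM : ((-i).toNat : Int) = -i := by omega
  have hMle : (-i).toNat ≤ a.length := by omega
  unfold lssLength_alt
  simp only []
  rw [pvRange_split a i (by omega)]
  rw [List.foldl_append]
  rw [← pvRowF_top a]
  have hfold0 := pvB_fold a 0 le_rfl (a.length) (a.length : Int) (by omega) le_rfl (by omega)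
  rw [show (0 : Int) - 1 = -1 from by ring] at hfold0
  rw [hfold0]
  rw [← pvRowH_zero]
  have hneg := pvB_fold_neg a (-i).toNat hMle (-i).toNat 0 (by omega)
  rw [show -((0 : Nat) : Int) - 1 = -1 from by norm_num] at hneg
  rw [show -(((-i).toNat : Nat) : Int) - 1 = i - 1 from by omega] at hneg
  rw [hneg]
  by_cases hj : 0 ≤ j ∧ j < (a.length : Int)
  · rw [if_pos hj]
    unfold pvRowH
    rw [pvMapRow_get a _ j (by omega) hj.2, if_pos hj.1]
    unfold pvAj
    rw [if_pos hj, PySem.List.pyGet?_eq_some_getElem a hj.1 hj.2,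
        List.getD_eq_getElem a 0 (by omega)]
  · rw [if_neg hj]
    unfold pvRowH
    rw [pvMapRow_get a _ (-1) le_rfl (by omega), if_neg (by omega)]
    unfold pvAj
    rw [if_neg hj]

-- ===== VERDICT (by name: the statement is the Claim_ definition above) =====
theorem lssLength_spec : Claim_equal_lssLength := by
  intro a i j _hD hP
  unfold Spec_lssLength
  by_cases h0 : 0 ≤ i
  · rw [pvA_eq_F a i j h0 hP.2, pvB_eq_F a i j h0 hP.2]
  · have h1 := hP.1
    have hA := pvA_eq_H a ((-i).toNat) (by omega) j
    rw [show -(((-i).toNat : Nat) : Int) = i from by omega] at hA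
    rw [hA, pvB_eq_H a i j (by omega) hP.1]
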